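-- pv_equiv track=rewrite | github.com/PaulBC/misc_scripts | pentominoes.py | to_coordinates
-- ===== SOURCE A (Python) =====
-- def to_coordinates(pentomino):
--   coordinates = []
--   pos = (0, 0)
--   for c in pentomino:
--     if c == '*':
--       coordinates.append(pos)
--
--     if c == '!':
--       pos = (pos[0] + 1, 0)
--     else:
--       pos = (pos[0], pos[1] + 1)
--   return coordinates
-- ===== SOURCE B (Python) =====
-- def to_coordinates(pentomino):
--   coordinates = []
--   for row, line in enumerate(pentomino.split('!')):
--     for col, c in enumerate(line):
--       if c == '*':
--         coordinates.append((row, col))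
--   return coordinates
-- ===== Notes on version B (the rewrite author's own statement) =====
-- stated objective: simpler
-- what changed: Replaced A's single-pass state machine that manually tracks a (row, col) position across every character with a pre-segmentation of the string into rows at the separator character, followed by nested enumerate over rows and columns.
import Mathlib
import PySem

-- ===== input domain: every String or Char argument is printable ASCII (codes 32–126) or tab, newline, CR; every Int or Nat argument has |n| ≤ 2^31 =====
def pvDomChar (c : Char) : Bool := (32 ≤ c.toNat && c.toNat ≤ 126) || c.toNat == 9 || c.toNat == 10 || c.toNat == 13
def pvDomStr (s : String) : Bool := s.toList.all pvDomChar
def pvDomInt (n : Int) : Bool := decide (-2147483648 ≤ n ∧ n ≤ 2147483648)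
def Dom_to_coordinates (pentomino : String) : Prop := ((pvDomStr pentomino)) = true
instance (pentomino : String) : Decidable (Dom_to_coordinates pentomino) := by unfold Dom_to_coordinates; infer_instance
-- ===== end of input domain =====

-- B replaces A's char-by-char (row,col) state machine with split-on-'!' plus nested enumerate (simpler decomposition).

-- ===== PORT A =====
-- one pass over the characters, carrying (coordinates, pos) exactly as A does
def to_coordinates (pentomino : String) : List (Int × Int) :=
  (pentomino.toList.foldl
    (fun (st : List (Int × Int) × (Int × Int)) (c : Char) =>
      let coordinates := if c = '*' then st.1 ++ [st.2] else st.1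
      let pos := if c = '!' then (st.2.1 + 1, (0 : Int)) else (st.2.1, st.2.2 + 1)
      (coordinates, pos))
    ([], (0, 0))).1

-- ===== PORT B =====
-- split on '!', then enumerate rows and characters, collecting (row, col) at each '*'
def to_coordinates_alt (pentomino : String) : List (Int × Int) :=
  (PySem.List.enumerate ((PySem.Str.split? pentomino "!").getD [])).foldl
    (fun (coordinates : List (Int × Int)) (rl : Int × String) =>
      (PySem.List.enumerate rl.2.toList).foldl
        (fun (acc : List (Int × Int)) (cc : Int × Char) =>
          if cc.2 = '*' then acc ++ [(rl.1, cc.1)] else acc)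
        coordinates)
    []

-- ===== PRECONDITION & SPEC =====
def Spec_to_coordinates (pentomino : String) (out : List (Int × Int)) : Prop := out = to_coordinates_alt pentomino
instance (pentomino : String) (out : List (Int × Int)) : Decidable (Spec_to_coordinates pentomino out) := by unfold Spec_to_coordinates; infer_instance

-- ===== CLAIM (what is proved, stated in full; the proofs are below) =====
def Claim_equal_to_coordinates : Prop := ∀ (pentomino : String), Dom_to_coordinates pentomino → Spec_to_coordinates pentomino (to_coordinates pentomino)

-- ===== LEMMAS AND PROOFS =====

-- the pure row decomposition of a pentomino string (split on '!')
def rowsOf : List Char → List (List Char)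
  | [] => [[]]
  | c :: t => if c = '!' then [] :: rowsOf t else (rowsOf t).modifyHead (c :: ·)

-- the '*'-coordinates of one row, columns starting at c
def bRow : List Char → Int → Int → List (Int × Int)
  | [], _, _ => []
  | ch :: t, r, c => (if ch = '*' then [(r, c)] else []) ++ bRow t r (c + 1)

-- the '*'-coordinates of a list of rows, rows starting at r
def bRows : List (List Char) → Int → List (Int × Int)
  | [], _ => []
  | row :: rest, r => bRow row r 0 ++ bRows rest (r + 1)

-- A's coordinates from position (r, c) onward
def coordsFrom : List Char → Int → Int → List (Int × Int)
  | [], _, _ => []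
  | ch :: t, r, c =>
      (if ch = '*' then [(r, c)] else []) ++
      (if ch = '!' then coordsFrom t (r + 1) 0 else coordsFrom t r (c + 1))

theorem rowsOf_ne_nil (l : List Char) : rowsOf l ≠ [] := by
  cases l with
  | nil => simp [rowsOf]
  | cons c t =>
    simp only [rowsOf]
    split
    · simp
    · cases h : rowsOf t with
      | nil => exact absurd h (rowsOf_ne_nil t)
      | cons a b => simp [List.modifyHead]

theorem foldlA_eq (l : List Char) (acc : List (Int × Int)) (r c : Int) :
    (l.foldl
      (fun (st : List (Int × Int) × (Int × Int)) (ch : Char) =>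
        let coordinates := if ch = '*' then st.1 ++ [st.2] else st.1
        let pos := if ch = '!' then (st.2.1 + 1, (0 : Int)) else (st.2.1, st.2.2 + 1)
        (coordinates, pos))
      (acc, (r, c))).1 = acc ++ coordsFrom l r c := by
  induction l generalizing acc r c with
  | nil => simp [coordsFrom]
  | cons ch t ih =>
    simp only [List.foldl_cons, coordsFrom]
    by_cases h1 : ch = '*'
    · have h2 : ch ≠ '!' := by subst h1; decide
      simp [h1, ih, List.append_assoc]
    · by_cases h2 : ch = '!'
      · simp [h2, ih]
      · simp [h1, h2, ih]

theorem coordsFrom_eq (l : List Char) (r c : Int) :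
    coordsFrom l r c =
      bRow ((rowsOf l).headI) r c ++ bRows ((rowsOf l).tail) (r + 1) := by
  induction l generalizing r c with
  | nil => simp [coordsFrom, rowsOf, bRow, bRows]
  | cons ch t ih =>
    by_cases h2 : ch = '!'
    · have h1 : ch ≠ '*' := by subst h2; decide
      simp only [coordsFrom, rowsOf, h2, if_pos]
      have : coordsFrom t (r + 1) 0 = bRows (rowsOf t) (r + 1) := by
        rw [ih]
        cases h : rowsOf t with
        | nil => exact absurd h (rowsOf_ne_nil t)
        | cons a b => simp [bRows, List.headI]
      simp [this, bRow, List.headI]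
    · simp only [coordsFrom, rowsOf, if_neg h2]
      cases h : rowsOf t with
      | nil => exact absurd h (rowsOf_ne_nil t)
      | cons a b =>
        simp only [List.modifyHead, List.headI, List.tail]
        rw [ih r (c + 1), h]
        simp [bRow, List.headI, List.append_assoc]

theorem foldlB_row (chars : List Char) (ri : Int) (a : List (Int × Int)) (c : Int) :
    (PySem.List.enumerate chars c).foldl
      (fun (acc : List (Int × Int)) (cc : Int × Char) =>
        if cc.2 = '*' then acc ++ [(ri, cc.1)] else acc) a
    = a ++ bRow chars ri c := by
  induction chars generalizing a c with
  | nil => simp [PySem.List.enumerate, bRow]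
  | cons ch t ih =>
    simp only [PySem.List.enumerate, List.foldl_cons, bRow]
    by_cases h : ch = '*' <;> simp [h, ih, List.append_assoc]

theorem foldlB_rows (rows : List (List Char)) (a : List (Int × Int)) (r : Int) :
    (PySem.List.enumerate (rows.map String.ofList) r).foldl
      (fun (coordinates : List (Int × Int)) (rl : Int × String) =>
        (PySem.List.enumerate rl.2.toList).foldl
          (fun (acc : List (Int × Int)) (cc : Int × Char) =>
            if cc.2 = '*' then acc ++ [(rl.1, cc.1)] else acc)
          coordinates) a
    = a ++ bRows rows r := by
  induction rows generalizing a r with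
  | nil => simp [bRows]
  | cons row rest ih =>
    simp only [List.map_cons, PySem.List.enumerate, List.foldl_cons, bRows]
    rw [show (String.ofList row).toList = row by simp, foldlB_row, ih, List.append_assoc]

theorem splitOn_go_eq (fuel : Nat) (l cur : List Char) (acc : List (List Char))
    (h : l.length ≤ fuel) :
    PySem.Chars.splitOn.go ['!'] fuel l cur acc
      = acc.reverse ++ (rowsOf l).modifyHead (cur.reverse ++ ·) := by
  induction fuel generalizing l cur acc with
  | zero =>
    have : l = [] := List.length_eq_zero_iff.mp (Nat.le_zero.mp h)
    subst this
    simp [PySem.Chars.splitOn.go, rowsOf, List.modifyHead]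
  | succ fuel ih =>
    cases l with
    | nil => simp [PySem.Chars.splitOn.go, rowsOf, List.modifyHead]
    | cons c rest =>
      simp only [PySem.Chars.splitOn.go]
      by_cases hc : c = '!'
      · have hp : List.isPrefixOf ['!'] (c :: rest) = true := by
          subst hc; simp [List.isPrefixOf]
        rw [if_pos hp]
        have : List.drop (['!'] : List Char).length (c :: rest) = rest := by simp
        rw [this, ih rest [] (cur.reverse :: acc) (by simpa using Nat.le_of_succ_le_succ h)]
        simp only [rowsOf, hc, if_pos, List.modifyHead, List.reverse_cons,
          List.append_assoc, List.singleton_append]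
        cases rowsOf rest <;> simp
      · have hp : List.isPrefixOf ['!'] (c :: rest) = false := by
          simp [List.isPrefixOf]; exact fun he => absurd he.symm hc
        rw [if_neg (by simp [hp])]
        rw [ih rest (c :: cur) acc (by simpa using Nat.le_of_succ_le_succ h)]
        have hmod : (rowsOf (c :: rest)).modifyHead (cur.reverse ++ ·)
            = (rowsOf rest).modifyHead ((c :: cur).reverse ++ ·) := by
          simp only [rowsOf, if_neg hc, List.modifyHead_modifyHead]
          apply congrFun
          apply congrArg
          funext x
          simp [Function.comp]
        rw [hmod]

theorem splitOn_eq_rowsOf (l : List Char) :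
    PySem.Chars.splitOn l ['!'] = rowsOf l := by
  unfold PySem.Chars.splitOn
  rw [splitOn_go_eq (l.length + 1) l [] [] (Nat.le_succ _)]
  cases h : rowsOf l with
  | nil => exact absurd h (rowsOf_ne_nil l)
  | cons a b => simp [List.modifyHead]

-- ===== VERDICT (by name: the statement is the Claim_ definition above) =====
theorem to_coordinates_spec : Claim_equal_to_coordinates := by
  intro p _
  unfold Spec_to_coordinates to_coordinates to_coordinates_alt
  have hs : PySem.Str.split? p "!" =
      some ((rowsOf p.toList).map String.ofList) := by
    unfold PySem.Str.split?
    have : ("!" : String).toList = ['!'] := by decide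
    rw [this]
    rw [show PySem.Chars.split? p.toList ['!']
          = some (PySem.Chars.splitOn p.toList ['!']) from by
        simp [PySem.Chars.split?]]
    rw [splitOn_eq_rowsOf]
    rfl
  rw [hs]
  simp only [Option.getD_some]
  rw [foldlB_rows, foldlA_eq, coordsFrom_eq]
  cases h : rowsOf p.toList with
  | nil => exact absurd h (rowsOf_ne_nil p.toList)
  | cons a b => simp [bRows, List.headI]
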